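-- pv_equiv track=rewrite | github.com/ahs2202/biobookshelf | biobookshelf/SC/single_cell.py | CB_detect_cell_barcode_from_id_cell
-- ===== SOURCE A (Python) =====
-- def CB_detect_cell_barcode_from_id_cell(
--     id_cell, int_min_number_atgc_in_cell_barcode=16
-- ):
--     """# 2023-04-02 14:10:46
--     retrieve cell_barcode from id_cell
--     'int_min_number_atgc_in_cell_barcode' : number of ATGC characters in the cell barcode
--     """
--     int_count_atgc = 0
--     int_start_appearance_of_atgc = None
--     set_atgc = set("ATGC")
--
--     def __retrieve_cell_barcode_and_id_channel_from_id_cell__(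
--         id_cell, int_start_appearance_of_atgc, int_count_atgc
--     ):
--         """__retrieve_cell_barcode_and_id_channel_from_id_cell__"""
--         int_cb_start = int_start_appearance_of_atgc
--         int_cb_end = int_start_appearance_of_atgc + int_count_atgc
--         return [
--             id_cell[int_cb_start:int_cb_end],
--             id_cell[:int_cb_start] + "|" + id_cell[int_cb_end:],
--         ]  # return cell_barcode, id_channel
--
--     for index_c, c in enumerate(
--         id_cell.upper()
--     ):  # case-insensitive detection of cell-barcodes
--         if c in set_atgc:
--             if int_start_appearance_of_atgc is None:
--                 int_start_appearance_of_atgc = index_c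
--             int_count_atgc += 1
--         else:
--             """identify cell barcode and return the cell barcode"""
--             if int_start_appearance_of_atgc is not None:
--                 if int_count_atgc >= int_min_number_atgc_in_cell_barcode:
--                     return __retrieve_cell_barcode_and_id_channel_from_id_cell__(
--                         id_cell, int_start_appearance_of_atgc, int_count_atgc
--                     )
--             # initialize the next search
--             int_count_atgc = 0
--             int_start_appearance_of_atgc = None
--     """ identify cell barcode and return the cell barcode """
--     if int_start_appearance_of_atgc is not None:
--         if int_count_atgc >= int_min_number_atgc_in_cell_barcode:
--             return __retrieve_cell_barcode_and_id_channel_from_id_cell__(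
--                 id_cell, int_start_appearance_of_atgc, int_count_atgc
--             )
--     """ return None when cell_barcode was not found """
--     return [None, None]
-- ===== SOURCE B (Python) =====
-- def CB_detect_cell_barcode_from_id_cell(
--     id_cell, int_min_number_atgc_in_cell_barcode=16
-- ):
--     """Two-phase: list all maximal ATGC runs (case-insensitive), then pick
--     the first run long enough to be a cell barcode."""
--     up = id_cell.upper()
--     n = len(up)
--     runs = []  # (start, length) of every maximal run of ATGC characters
--     i = 0
--     while i < n:
--         if up[i] in "ATGC":
--             j = i + 1
--             while j < n and up[j] in "ATGC":
--                 j += 1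
--             runs.append((i, j - i))
--             i = j
--         else:
--             i += 1
--     for start, length in runs:
--         if length >= int_min_number_atgc_in_cell_barcode:
--             return [
--                 id_cell[start : start + length],
--                 id_cell[:start] + "|" + id_cell[start + length :],
--             ]
--     return [None, None]
-- ===== Notes on version B (the rewrite author's own statement) =====
-- stated objective: alternative
-- what changed: A's single stateful scan (ATGC counter + optional run-start index with reset logic and mid-loop/post-loop returns) is replaced by a two-phase decomposition: first collect all maximal ATGC runs as (start, length) pairs, then pick the first run of sufficient length.
import Mathlib
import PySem

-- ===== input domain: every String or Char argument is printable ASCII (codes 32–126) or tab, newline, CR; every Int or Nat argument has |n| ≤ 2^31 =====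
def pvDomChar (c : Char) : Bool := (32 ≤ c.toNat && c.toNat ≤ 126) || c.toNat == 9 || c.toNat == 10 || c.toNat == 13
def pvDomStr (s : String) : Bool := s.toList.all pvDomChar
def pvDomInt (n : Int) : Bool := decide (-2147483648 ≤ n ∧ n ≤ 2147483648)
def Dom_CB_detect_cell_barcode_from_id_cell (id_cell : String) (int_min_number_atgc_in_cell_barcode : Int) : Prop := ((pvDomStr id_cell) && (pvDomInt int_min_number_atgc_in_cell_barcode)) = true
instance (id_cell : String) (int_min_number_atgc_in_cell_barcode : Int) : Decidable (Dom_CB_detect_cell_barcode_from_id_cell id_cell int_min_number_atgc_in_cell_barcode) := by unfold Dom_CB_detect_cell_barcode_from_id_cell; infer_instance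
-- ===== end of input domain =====

-- B replaces A's stateful single scan (counter + optional start index + reset logic)
-- by a two-phase decomposition: first list every maximal ATGC run, then pick the first
-- long-enough one (objective: alternative/simpler structure, same cost).

-- ===== PORT A =====
-- set("ATGC")
def pvAtgcSetA : List Char := PySem.Set.ofList "ATGC".toList

-- __retrieve_cell_barcode_and_id_channel_from_id_cell__
def pvRetrieveA (id_cell : String) (int_start : Int) (int_count : Int) : List (Option String) :=
  [ some (PySem.Str.slice id_cell (some int_start) (some (int_start + int_count))),
    some (PySem.Str.slice id_cell none (some int_start) ++ "|"
          ++ PySem.Str.slice id_cell (some (int_start + int_count)) none) ]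

-- the for-loop over enumerate(id_cell.upper()) with state (int_count_atgc, int_start_appearance_of_atgc),
-- including the post-loop check on the [] case
def pvLoopA (id_cell : String) (thr : Int) :
    List (Int × Char) → Int → Option Int → List (Option String)
  | [], cnt, st =>
      match st with
      | some s => if cnt ≥ thr then pvRetrieveA id_cell s cnt else [none, none]
      | none => [none, none]
  | (idx, c) :: rest, cnt, st =>
      if pvAtgcSetA.contains c then
        match st with
        | some s => pvLoopA id_cell thr rest (cnt + 1) (some s)
        | none => pvLoopA id_cell thr rest (cnt + 1) (some idx)
      else
        match st with
        | some s =>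
            if cnt ≥ thr then pvRetrieveA id_cell s cnt
            else pvLoopA id_cell thr rest 0 none
        | none => pvLoopA id_cell thr rest 0 none

def CB_detect_cell_barcode_from_id_cell (id_cell : String) (int_min_number_atgc_in_cell_barcode : Int) : List (Option String) :=
  pvLoopA id_cell int_min_number_atgc_in_cell_barcode
    (PySem.List.enumerate (PySem.Str.upper id_cell).toList 0) 0 none

-- ===== PORT B =====
-- B's inner `while j < n and up[j] in "ATGC"` : length of the leading ATGC run
def pvRunLenB : List Char → Nat
  | [] => 0
  | c :: cs => if "ATGC".toList.contains c then pvRunLenB cs + 1 else 0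

-- B's outer while-loop building runs = [(start, length), …] of maximal ATGC runs
def pvRunsB : List Char → Nat → List (Nat × Nat)
  | [], _ => []
  | c :: cs, i =>
      if "ATGC".toList.contains c then
        let j := pvRunLenB cs
        (i, j + 1) :: pvRunsB (cs.drop j) (i + j + 1)
      else
        pvRunsB cs (i + 1)
  termination_by l => l.length
  decreasing_by all_goals simp [List.length_drop]; try omega

-- B's for-loop over the collected runs
def pvPickB (id_cell : String) (thr : Int) : List (Nat × Nat) → List (Option String)
  | [] => [none, none]
  | (start, len) :: rest =>
      if (len : Int) ≥ thr then
        [ some (PySem.Str.slice id_cell (some (start : Int)) (some ((start : Int) + (len : Int)))),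
          some (PySem.Str.slice id_cell none (some (start : Int)) ++ "|"
                ++ PySem.Str.slice id_cell (some ((start : Int) + (len : Int))) none) ]
      else pvPickB id_cell thr rest

def CB_detect_cell_barcode_from_id_cell_alt (id_cell : String) (int_min_number_atgc_in_cell_barcode : Int) : List (Option String) :=
  pvPickB id_cell int_min_number_atgc_in_cell_barcode
    (pvRunsB (PySem.Str.upper id_cell).toList 0)

-- ===== PRECONDITION & SPEC =====
def Spec_CB_detect_cell_barcode_from_id_cell (id_cell : String) (int_min_number_atgc_in_cell_barcode : Int) (out : List (Option String)) : Prop := out = CB_detect_cell_barcode_from_id_cell_alt id_cell int_min_number_atgc_in_cell_barcode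
instance (id_cell : String) (int_min_number_atgc_in_cell_barcode : Int) (out : List (Option String)) : Decidable (Spec_CB_detect_cell_barcode_from_id_cell id_cell int_min_number_atgc_in_cell_barcode out) := by unfold Spec_CB_detect_cell_barcode_from_id_cell; infer_instance

-- ===== CLAIM (what is proved, stated in full; the proofs are below) =====
def Claim_equal_CB_detect_cell_barcode_from_id_cell : Prop := ∀ (id_cell : String) (int_min_number_atgc_in_cell_barcode : Int), Dom_CB_detect_cell_barcode_from_id_cell id_cell int_min_number_atgc_in_cell_barcode → Spec_CB_detect_cell_barcode_from_id_cell id_cell int_min_number_atgc_in_cell_barcode (CB_detect_cell_barcode_from_id_cell id_cell int_min_number_atgc_in_cell_barcode)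

-- ===== LEMMAS AND PROOFS =====

theorem pvAtgcSetA_eq : pvAtgcSetA = "ATGC".toList := by decide

-- skipping a leading non-ATGC char (or nothing) does not change the runs
theorem pvRunsB_tail_step (cs : List Char) (c : Char) (i : Nat)
    (hc : "ATGC".toList.contains c = false) :
    pvRunsB (c :: cs) i = pvRunsB cs (i + 1) := by
  rw [pvRunsB]; rw [hc]; rfl

theorem pvRunsB_cons_pos (cs : List Char) (c : Char) (i : Nat)
    (hc : "ATGC".toList.contains c = true) :
    pvRunsB (c :: cs) i =
      (i, pvRunLenB cs + 1) :: pvRunsB (cs.drop (pvRunLenB cs)) (i + pvRunLenB cs + 1) := by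
  rw [pvRunsB]; rw [hc]; rfl

theorem pvRunLenB_cons_pos (cs : List Char) (c : Char)
    (hc : "ATGC".toList.contains c = true) :
    pvRunLenB (c :: cs) = pvRunLenB cs + 1 := by
  rw [pvRunLenB]; rw [hc]; rfl

theorem pvRunLenB_cons_neg (cs : List Char) (c : Char)
    (hc : "ATGC".toList.contains c = false) :
    pvRunLenB (c :: cs) = 0 := by
  rw [pvRunLenB]; rw [hc]; rfl

-- combined invariant, strong induction on the remaining suffix length:
--  Main: A's loop started fresh at offset i equals B's pick over B's runs of the suffix;
--  Run : A's loop mid-run (cnt ≥ 1 chars seen, run started at s) equals the decision on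
--        the completed run of length cnt + pvRunLenB l, else B on the rest.
theorem pvMainRun (id_cell : String) (thr : Int) (N : Nat) :
    ∀ l : List Char, l.length ≤ N →
      ((∀ i : Nat,
          pvLoopA id_cell thr (PySem.List.enumerate l (i : Int)) 0 none =
            pvPickB id_cell thr (pvRunsB l i)) ∧
       (∀ s cnt : Nat, 1 ≤ cnt →
          pvLoopA id_cell thr (PySem.List.enumerate l ((s + cnt : Nat) : Int)) (cnt : Int) (some (s : Int)) =
            if ((cnt + pvRunLenB l : Nat) : Int) ≥ thr then
              pvRetrieveA id_cell (s : Int) ((cnt + pvRunLenB l : Nat) : Int)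
            else pvPickB id_cell thr (pvRunsB (l.drop (pvRunLenB l)) (s + cnt + pvRunLenB l)))) := by
  induction N with
  | zero =>
      intro l hl
      have hnil : l = [] := List.length_eq_zero_iff.mp (Nat.le_zero.mp hl)
      subst hnil
      constructor
      · intro i; simp [PySem.List.enumerate, pvLoopA, pvRunsB, pvPickB]
      · intro s cnt _
        simp [PySem.List.enumerate, pvLoopA, pvRunsB, pvPickB, pvRunLenB]
  | succ N ih =>
      intro l hl
      match l with
      | [] =>
          constructor
          · intro i; simp [PySem.List.enumerate, pvLoopA, pvRunsB, pvPickB]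
          · intro s cnt _
            simp [PySem.List.enumerate, pvLoopA, pvRunsB, pvPickB, pvRunLenB]
      | c :: cs =>
          have hcs : cs.length ≤ N := by simpa using Nat.succ_le_succ_iff.mp hl
          obtain ⟨ihMain, ihRun⟩ := ih cs hcs
          by_cases hc : "ATGC".toList.contains c = true
          · -- c is an ATGC character
            constructor
            · intro i
              rw [PySem.List.enumerate_cons, pvLoopA]
              rw [pvAtgcSetA_eq, hc]
              simp only [if_true]
              have h1 : (i : Int) + 1 = ((i + 1 : Nat) : Int) := by push_cast; ring
              have h2 : i + 1 = i + (1 : Nat) := rfl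
              rw [h1]
              have := ihRun i 1 (le_refl 1)
              rw [show ((0:Int) + 1 = ((1:Nat) : Int)) from by norm_num] at *
              rw [this]
              rw [pvRunsB_cons_pos cs c i hc]
              rw [pvPickB]
              have hcomm : 1 + pvRunLenB cs = pvRunLenB cs + 1 := Nat.add_comm _ _
              rw [hcomm]
              have hidx : i + 1 + pvRunLenB cs = i + pvRunLenB cs + 1 := by omega
              rw [hidx]
              rfl
            · intro s cnt hcnt
              rw [PySem.List.enumerate_cons, pvLoopA]
              rw [pvAtgcSetA_eq, hc]
              simp only [if_true]
              have h1 : ((s + cnt : Nat) : Int) + 1 = ((s + (cnt + 1) : Nat) : Int) := by push_cast; ring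
              have h2 : (cnt : Int) + 1 = ((cnt + 1 : Nat) : Int) := by push_cast; ring
              rw [h1, h2]
              have := ihRun s (cnt + 1) (by omega)
              rw [this]
              rw [pvRunLenB_cons_pos cs c hc]
              have ha : cnt + 1 + pvRunLenB cs = cnt + (pvRunLenB cs + 1) := by omega
              have hb : s + (cnt + 1) + pvRunLenB cs = s + cnt + (pvRunLenB cs + 1) := by omega
              rw [ha, hb]
              have hd : List.drop (pvRunLenB cs) cs = List.drop (pvRunLenB cs + 1) (c :: cs) := by
                simp [List.drop]
              rw [hd]
          · -- c is not an ATGC character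
            have hc' : "ATGC".toList.contains c = false := by
              cases h : "ATGC".toList.contains c
              · rfl
              · exact absurd h hc
            constructor
            · intro i
              rw [PySem.List.enumerate_cons, pvLoopA]
              rw [pvAtgcSetA_eq, hc']
              simp only [Bool.false_eq_true, if_false]
              have h1 : (i : Int) + 1 = ((i + 1 : Nat) : Int) := by push_cast; ring
              rw [h1, ihMain (i + 1), pvRunsB_tail_step cs c i hc']
            · intro s cnt hcnt
              rw [PySem.List.enumerate_cons, pvLoopA]
              rw [pvAtgcSetA_eq, hc']
              simp only [Bool.false_eq_true, if_false]
              rw [pvRunLenB_cons_neg cs c hc']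
              simp only [List.drop_zero, Nat.add_zero]
              by_cases hthr : (cnt : Int) ≥ thr
              · rw [if_pos hthr, if_pos hthr]
              · rw [if_neg hthr, if_neg hthr]
                have h1 : ((s + cnt : Nat) : Int) + 1 = ((s + cnt + 1 : Nat) : Int) := by push_cast; ring
                rw [h1, ihMain (s + cnt + 1), pvRunsB_tail_step cs c (s + cnt) hc']

-- ===== VERDICT (by name: the statement is the Claim_ definition above) =====
theorem CB_detect_cell_barcode_from_id_cell_spec : Claim_equal_CB_detect_cell_barcode_from_id_cell := by
  intro id_cell thr _
  unfold Spec_CB_detect_cell_barcode_from_id_cell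
  unfold CB_detect_cell_barcode_from_id_cell CB_detect_cell_barcode_from_id_cell_alt
  have h := (pvMainRun id_cell thr (PySem.Str.upper id_cell).toList.length
              (PySem.Str.upper id_cell).toList (le_refl _)).1 0
  simpa using h
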